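-- pv_equiv track=rewrite | github.com/bnotluvinit/intcke | Arrays/first_orders.py | is_first_come_first_served
-- ===== SOURCE A (Python) =====
-- def is_first_come_first_served(take_out_orders, dine_in_orders, served_orders):
--
--     # Base case
--     if len(served_orders) == 0:
--         return True
--
--     # If the first order in served_orders is the same as the
--     # first order in take_out_orders
--     # (making sure first that we have an order in take_out_orders)
--     if len(take_out_orders) and take_out_orders[0] == served_orders[0]:
--         # Take the first order off take_out_orders and served_orders and recurse
--         return is_first_come_first_served(take_out_orders[1:], dine_in_orders, served_orders[1:])
--
--     # If the first order in served_orders is the same as the first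
--     # in dine_in_orders
--     elif len(dine_in_orders) and dine_in_orders[0] == served_orders[0]:
--         # Take the first order off dine_in_orders and served_orders and recurse
--         return is_first_come_first_served(take_out_orders, dine_in_orders[1:], served_orders[1:])
--
--     # First order in served_orders doesn't match the first in
--     # take_out_orders or dine_in_orders, so we know it's not first-come, first-served
--     else:
--         return False
-- ===== SOURCE B (Python) =====
-- def is_first_come_first_served(take_out_orders, dine_in_orders, served_orders):
--     i = 0
--     j = 0
--     for order in served_orders:
--         if i < len(take_out_orders) and take_out_orders[i] == order:
--             i += 1
--         elif j < len(dine_in_orders) and dine_in_orders[j] == order: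
--             j += 1
--         else:
--             return False
--     return True
-- ===== Notes on version B (the rewrite author's own statement) =====
-- stated objective: faster
-- what changed: Replaced the slicing recursion (each call copies list tails) with a single iterative two-pointer pass over served_orders.
import Mathlib
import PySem

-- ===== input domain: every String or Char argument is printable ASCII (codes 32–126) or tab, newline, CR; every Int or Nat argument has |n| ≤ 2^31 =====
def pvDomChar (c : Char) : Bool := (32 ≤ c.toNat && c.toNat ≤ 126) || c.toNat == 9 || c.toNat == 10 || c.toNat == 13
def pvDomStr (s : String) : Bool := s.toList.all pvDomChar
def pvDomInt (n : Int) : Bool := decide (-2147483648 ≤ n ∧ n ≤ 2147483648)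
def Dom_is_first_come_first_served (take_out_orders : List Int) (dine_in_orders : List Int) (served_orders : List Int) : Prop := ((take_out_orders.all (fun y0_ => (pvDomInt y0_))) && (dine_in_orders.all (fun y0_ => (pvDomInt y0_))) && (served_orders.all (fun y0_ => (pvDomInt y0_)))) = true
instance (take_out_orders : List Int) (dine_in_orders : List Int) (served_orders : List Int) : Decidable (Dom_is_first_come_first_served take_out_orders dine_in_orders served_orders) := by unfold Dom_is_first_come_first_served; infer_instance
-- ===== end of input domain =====

-- B replaces A's slicing recursion by a single two-pointer pass; objective: faster (asymptotic).

-- ===== PORT A =====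
-- A recurses on the tails of the lists; the len(...)+[0] test is head? = some o.
def is_first_come_first_served (take_out_orders : List Int) (dine_in_orders : List Int) (served_orders : List Int) : Bool :=
  match served_orders with
  | [] => true
  | o :: s' =>
    if take_out_orders.head? = some o then
      is_first_come_first_served take_out_orders.tail dine_in_orders s'
    else if dine_in_orders.head? = some o then
      is_first_come_first_served take_out_orders dine_in_orders.tail s'
    else
      false
termination_by served_orders.length
decreasing_by all_goals simp

-- ===== PORT B =====
-- The loop over served_orders with index counters i, j; 'i < len(t) and t[i] == order' is t[i]? = some o.
def pvFcfsGo (take_out_orders : List Int) (dine_in_orders : List Int) (served_orders : List Int) (i j : Nat) : Bool :=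
  match served_orders with
  | [] => true
  | o :: s' =>
    if take_out_orders[i]? = some o then
      pvFcfsGo take_out_orders dine_in_orders s' (i + 1) j
    else if dine_in_orders[j]? = some o then
      pvFcfsGo take_out_orders dine_in_orders s' i (j + 1)
    else
      false

def is_first_come_first_served_alt (take_out_orders : List Int) (dine_in_orders : List Int) (served_orders : List Int) : Bool :=
  pvFcfsGo take_out_orders dine_in_orders served_orders 0 0

-- ===== PRECONDITION & SPEC =====
def Spec_is_first_come_first_served (take_out_orders : List Int) (dine_in_orders : List Int) (served_orders : List Int) (out : Bool) : Prop := out = is_first_come_first_served_alt take_out_orders dine_in_orders served_orders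
instance (take_out_orders : List Int) (dine_in_orders : List Int) (served_orders : List Int) (out : Bool) : Decidable (Spec_is_first_come_first_served take_out_orders dine_in_orders served_orders out) := by unfold Spec_is_first_come_first_served; infer_instance

-- ===== CLAIM (what is proved, stated in full; the proofs are below) =====
def Claim_equal_is_first_come_first_served : Prop := ∀ (take_out_orders : List Int) (dine_in_orders : List Int) (served_orders : List Int), Dom_is_first_come_first_served take_out_orders dine_in_orders served_orders → Spec_is_first_come_first_served take_out_orders dine_in_orders served_orders (is_first_come_first_served take_out_orders dine_in_orders served_orders)

-- ===== LEMMAS AND PROOFS =====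
-- Invariant: A on the dropped suffixes equals B's worker at counters i, j.
theorem pvFcfs_drop (s t d : List Int) (i j : Nat) :
    is_first_come_first_served (t.drop i) (d.drop j) s = pvFcfsGo t d s i j := by
  induction s generalizing i j with
  | nil => simp [is_first_come_first_served, pvFcfsGo]
  | cons o s' ih =>
    rw [is_first_come_first_served, pvFcfsGo]
    have ht : (t.drop i).head? = t[i]? := by
      rw [List.head?_drop]
    have hd : (d.drop j).head? = d[j]? := by
      rw [List.head?_drop]
    rw [ht, hd]
    split_ifs with h1 h2
    · rw [List.tail_drop, ih]
    · rw [List.tail_drop, ih]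
    · rfl

-- ===== VERDICT (by name: the statement is the Claim_ definition above) =====
theorem is_first_come_first_served_spec : Claim_equal_is_first_come_first_served := by
  intro t d s _
  unfold Spec_is_first_come_first_served is_first_come_first_served_alt
  have := pvFcfs_drop s t d 0 0
  simpa using this
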